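-- pv_equiv track=rewrite | github.com/shenxiaoxu/leetcode | questions/1708. Largest Subarray Length K/array.py | distinctThree
-- ===== SOURCE A (Python) =====
-- from typing import List
--
-- def distinctThree(nums: List[int], k:int)->List[int]:
-- 	i, j, d, n = 0, 1, 0, len(nums)
-- 	while j + k - 1 < n:
-- 		if nums[i + d] == nums[j + d] and d < k:
-- 			d += 1
-- 			continue
-- 		if nums[i + d] < nums[j + d]:
-- 			i = max(i + d + 1, j)
-- 			j = i + 1
-- 		else:
-- 			j = j + d + 1
-- 		d = 0
-- 	return nums[i: i + k]
-- ===== SOURCE B (Python) =====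
-- from typing import List
--
-- def distinctThree(nums: List[int], k: int) -> List[int]:
--     n = len(nums)
--     best = nums[0:k]
--     for start in range(1, n - k + 1):
--         cand = nums[start:start + k]
--         if best < cand:
--             best = cand
--     return best
-- ===== Notes on version B (the rewrite author's own statement) =====
-- stated objective: simpler
-- what changed: Replaced the stateful two-pointer/offset scan by a plain brute-force scan that keeps the lexicographically largest length-k window, relying on Python's list comparison.
-- outside the precondition, e.g. on distinctThree([1, 1], 1): A raises IndexError, B returns [1]; on distinctThree([0, 0, 1], 2): A returns [1], B returns [0, 1]
import Mathlib
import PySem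

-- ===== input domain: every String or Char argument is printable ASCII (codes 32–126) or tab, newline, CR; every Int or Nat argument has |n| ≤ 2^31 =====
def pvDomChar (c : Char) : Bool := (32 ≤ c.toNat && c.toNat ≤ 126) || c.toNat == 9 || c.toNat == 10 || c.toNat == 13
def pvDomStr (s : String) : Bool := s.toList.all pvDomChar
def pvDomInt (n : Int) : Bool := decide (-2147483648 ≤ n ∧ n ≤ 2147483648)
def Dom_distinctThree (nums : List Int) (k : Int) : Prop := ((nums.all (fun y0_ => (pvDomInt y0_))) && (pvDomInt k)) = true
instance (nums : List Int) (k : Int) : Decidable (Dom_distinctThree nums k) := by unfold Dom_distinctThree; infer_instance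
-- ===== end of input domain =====

-- B replaces A's two-pointer/offset scan by a brute-force lexicographic maximum over all
-- length-k windows (objective: simpler); equal cost class in practice, no speed claim.

-- ===== PORT A =====
-- the while-loop of A as a recursion on the state (i, j, d); Python's IndexError cells are
-- read with pyGetD (default 0) — exact on Pre_, where every access A performs is in range
-- the loop is run on a structural fuel argument (a totality guard only: on every input
-- admitted by Pre_ the loop performs at most nums.length iterations, see loop_eq)
def distinctThreeLoop (nums : List Int) (k : Int) (n : Nat) : Nat → Nat → Nat → Nat → Nat
  | 0, i, _, _ => i
  | fuel + 1, i, j, d =>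
    if (j : Int) + k - 1 < (n : Int) then
      if PySem.List.pyGetD nums ((i : Int) + (d : Int)) 0 = PySem.List.pyGetD nums ((j : Int) + (d : Int)) 0
          ∧ (d : Int) < k then
        distinctThreeLoop nums k n fuel i j (d + 1)
      else if PySem.List.pyGetD nums ((i : Int) + (d : Int)) 0 < PySem.List.pyGetD nums ((j : Int) + (d : Int)) 0 then
        distinctThreeLoop nums k n fuel (max (i + d + 1) j) (max (i + d + 1) j + 1) 0
      else
        distinctThreeLoop nums k n fuel i (j + d + 1) 0
    else i

def distinctThree (nums : List Int) (k : Int) : List Int :=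
  PySem.List.slice nums (some (distinctThreeLoop nums k nums.length (nums.length + 1) 0 1 0 : Int))
    (some ((distinctThreeLoop nums k nums.length (nums.length + 1) 0 1 0 : Int) + k))

-- ===== PORT B =====
-- Python's lexicographic `<` on lists of ints
def pyLexLtB : List Int → List Int → Bool
  | _, [] => false
  | [], _ :: _ => true
  | a :: as_, b :: bs => if a < b then true else if b < a then false else pyLexLtB as_ bs

def distinctThree_alt (nums : List Int) (k : Int) : List Int :=
  (PySem.List.pyRange 1 ((nums.length : Int) - k + 1) 1).foldl
    (fun best s =>
      let cand := PySem.List.slice nums (some s) (some (s + k))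
      if pyLexLtB best cand then cand else best)
    (PySem.List.slice nums (some 0) (some k))

-- ===== PRECONDITION & SPEC =====
-- Pre_ excludes duplicate-element inputs with 1 ≤ k < len(nums): on those A's equal-window
-- offset scan may raise IndexError (it reads nums[j+k]) and, where it happens to return,
-- can return a window shorter than k — an artefact of its implementation (LeetCode 1708
-- guarantees distinct elements); B returns the largest length-k window there.
def Pre_distinctThree (nums : List Int) (k : Int) : Prop :=
  (1 ≤ k ∧ nums.Nodup) ∨ (0 ≤ k ∧ (nums.length : Int) ≤ k)
instance (nums : List Int) (k : Int) : Decidable (Pre_distinctThree nums k) := by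
  unfold Pre_distinctThree; infer_instance

def pvWitness_distinctThree : List Int × Int := ([3, 1, 2], 2)

def Spec_distinctThree (nums : List Int) (k : Int) (out : List Int) : Prop := out = distinctThree_alt nums k
instance (nums : List Int) (k : Int) (out : List Int) : Decidable (Spec_distinctThree nums k out) := by
  unfold Spec_distinctThree; infer_instance

-- ===== CLAIM (what is proved, stated in full; the proofs are below) =====
def Claim_equal_distinctThree : Prop := ∀ (nums : List Int) (k : Int), Dom_distinctThree nums k → Pre_distinctThree nums k → Spec_distinctThree nums k (distinctThree nums k)

-- ===== LEMMAS AND PROOFS =====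

-- xs[s:s+k] for a Nat start and 0 ≤ k is drop-then-take
lemma slice_nat (nums : List Int) (k : Int) (hk : 0 ≤ k) (s : Nat) :
    PySem.List.slice nums (some (s : Int)) (some ((s : Int) + k)) = (nums.drop s).take k.toNat := by
  rw [PySem.List.slice_toNat nums (by omega) (by omega)]
  congr 1
  omega

-- comparing two nonempty windows of a nodup list is comparing their first elements
lemma headlt (nums : List Int) (m : Nat) (hnd : nums.Nodup) (s t : Nat)
    (hs : s < nums.length) (ht : t < nums.length) (hst : s ≠ t) :
    pyLexLtB ((nums.drop s).take (m + 1)) ((nums.drop t).take (m + 1))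
      = decide (nums.getD s 0 < nums.getD t 0) := by
  rw [List.drop_eq_getElem_cons hs, List.drop_eq_getElem_cons ht, List.take_succ_cons,
      List.take_succ_cons, List.getD_eq_getElem nums 0 hs, List.getD_eq_getElem nums 0 ht]
  have hne : nums[s] ≠ nums[t] := fun h => hst ((List.Nodup.getElem_inj_iff hnd).mp h)
  rcases lt_trichotomy nums[s] nums[t] with h | h | h
  · simp [pyLexLtB, h]
  · exact absurd h hne
  · simp [pyLexLtB, h, not_lt_of_gt h]

lemma loop_eq (nums : List Int) (k : Int) (hk : 1 ≤ k) (hnd : nums.Nodup) :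
    ∀ fuel j i : Nat, (((nums.length : Int) + 1 - k).toNat - j) ≤ fuel → i < j → (i : Int) + k ≤ (nums.length : Int) →
    (nums.drop (distinctThreeLoop nums k nums.length fuel i j 0)).take k.toNat
      = (PySem.List.pyRange (j : Int) ((nums.length : Int) - k + 1) 1).foldl
          (fun best s =>
            let cand := PySem.List.slice nums (some s) (some (s + k))
            if pyLexLtB best cand then cand else best)
          ((nums.drop i).take k.toNat) := by
  intro fuel
  induction fuel with
  | zero =>
    intro j i hm hij hik
    rw [distinctThreeLoop, PySem.List.pyRange_one_eq_nil (by omega)]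
    rfl
  | succ fuel ih =>
    intro j i hm hij hik
    by_cases h : (j : Int) + k - 1 < (nums.length : Int)
    · obtain ⟨m, hm'⟩ : ∃ m, k.toNat = m + 1 := ⟨k.toNat - 1, by omega⟩
      have hsn : i < nums.length := by omega
      have htn : j < nums.length := by omega
      have hgd : nums.getD i 0 ≠ nums.getD j 0 := by
        rw [List.getD_eq_getElem nums 0 hsn, List.getD_eq_getElem nums 0 htn]
        exact fun hh => absurd ((List.Nodup.getElem_inj_iff hnd).mp hh) (by omega)
      rw [distinctThreeLoop, if_pos h]
      rw [PySem.List.pyRange_one_cons (by omega)]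
      rw [List.foldl_cons]
      simp only [PySem.List.pyGetD_natCast, Int.natCast_zero, add_zero]
      rw [if_neg (by exact fun hc => hgd hc.1)]
      rw [slice_nat nums k (by omega) j, hm',
          headlt nums m hnd i j hsn htn (by omega), ← hm']
      by_cases hc : nums.getD i 0 < nums.getD j 0
      · rw [if_pos hc, if_pos (by simpa using hc)]
        have hmax : max (i + 0 + 1) j = j := by omega
        rw [hmax]
        have := ih (j + 1) j (by omega) (by omega) (by omega)
        rw [this]
        norm_num
      · rw [if_neg hc, if_neg (by simpa using hc)]
        have := ih (j + 0 + 1) i (by omega) (by omega) hik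
        rw [this]
        norm_num
    · rw [distinctThreeLoop, if_neg h, PySem.List.pyRange_one_eq_nil (by omega)]
      rfl

-- ===== VERDICT (by name: the statement is the Claim_ definition above) =====
theorem distinctThree_spec : Claim_equal_distinctThree := by
  intro nums k _ hpre
  unfold Spec_distinctThree distinctThree distinctThree_alt
  by_cases hkn : (nums.length : Int) ≤ k
  · -- loop body never runs; both return nums[0:k]
    have hk0 : 0 ≤ k := by
      rcases hpre with ⟨h1, _⟩ | ⟨h1, _⟩ <;> omega
    rw [distinctThreeLoop, if_neg (by omega : ¬((1:Nat) : Int) + k - 1 < (nums.length : Int)), PySem.List.pyRange_one_eq_nil (by omega)]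
    simp
  · rcases hpre with ⟨hk, hnd⟩ | ⟨_, h⟩
    · rw [slice_nat nums k (by omega) (distinctThreeLoop nums k nums.length (nums.length + 1) 0 1 0)]
      rw [loop_eq nums k hk hnd (nums.length + 1) 1 0 (by omega) (by omega) (by omega)]
      rw [PySem.List.slice_zero_start, PySem.List.slice_to nums (by omega : (0:Int) ≤ k)]
      simp
    · omega
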